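-- pv_equiv track=rewrite | github.com/chanzer0/NBA-DFS-Tools | src/nba_swap_sims.py | extract_players
-- ===== SOURCE A (Python) =====
-- def extract_players(lineup_string, positions_order):
--     players = {}
--     words = lineup_string.split()
--     pos = None  # to keep track of current position
--     player_name = []
--
--     for word in words:
--         if word in positions_order:
--             if pos:
--                 players[pos] = " ".join(player_name) if player_name else "LOCKED"
--             pos = word
--             player_name = []
--         else:
--             player_name.append(word)
--
--     # for the last player in the string
--     if pos:
--         players[pos] = " ".join(player_name) if player_name else "LOCKED"
--
--     # In case there are positions that weren't found in the lineup_string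
--     for position in positions_order:
--         if position not in players:
--             players[position] = "LOCKED"
--
--     return players
-- ===== SOURCE B (Python) =====
-- def extract_players(lineup_string, positions_order):
--     posset = set(positions_order)
--     words = lineup_string.split()
--     # chunk parser: jump to the first position marker, then repeatedly split
--     # off one (position, name-words) chunk at the next marker index
--     rest = words[next((i for i, w in enumerate(words) if w in posset), len(words)):]
--     players = {}
--     while rest:
--         pos, rest = rest[0], rest[1:]
--         k = next((i for i, w in enumerate(rest) if w in posset), len(rest))
--         name, rest = rest[:k], rest[k:]
--         players[pos] = " ".join(name) if name else "LOCKED"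
--     for position in positions_order:
--         if position not in players:
--             players[position] = "LOCKED"
--     return players
-- ===== Notes on version B (the rewrite author's own statement) =====
-- stated objective: alternative
-- what changed: Replaces A's word-by-word state machine (current position + name accumulator + flush-on-next-marker) with a chunk parser that jumps to the first marker and then repeatedly slices off one whole (position, name-words) chunk at the next marker index; the positions set is built once for membership tests.
import Mathlib
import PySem

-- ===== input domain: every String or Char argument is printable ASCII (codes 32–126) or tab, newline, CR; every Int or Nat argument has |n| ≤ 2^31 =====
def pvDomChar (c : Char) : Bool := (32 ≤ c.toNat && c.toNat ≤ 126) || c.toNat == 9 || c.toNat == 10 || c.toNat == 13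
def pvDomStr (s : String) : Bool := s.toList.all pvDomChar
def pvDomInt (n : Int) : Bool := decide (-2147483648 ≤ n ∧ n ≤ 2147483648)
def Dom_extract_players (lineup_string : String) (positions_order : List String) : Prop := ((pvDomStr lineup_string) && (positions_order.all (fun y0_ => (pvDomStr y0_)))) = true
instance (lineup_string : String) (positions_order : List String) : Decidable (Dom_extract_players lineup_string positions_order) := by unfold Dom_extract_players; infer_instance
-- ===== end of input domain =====

-- B replaces A's streaming position/name-accumulator state machine with a chunk parser
-- (jump to the first marker, then repeatedly slice off one (position, name-words) chunk);
-- same return value (return-value equivalence; neither mutates its arguments).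


-- ===== PORT A =====
-- " ".join(player_name) if player_name else "LOCKED"   (shared by both sources verbatim)
def pvJoinOr (player_name : List String) : String :=
  if player_name ≠ [] then PySem.Str.join " " player_name else "LOCKED"

-- "if pos: players[pos] = …"  (pos is None or a word; Python str truthiness = nonempty)
def pvFlushA (players : PySem.Dict String String) (pos : Option String)
    (player_name : List String) : PySem.Dict String String :=
  match pos with
  | some p => if p ≠ "" then players.insert p (pvJoinOr player_name) else players
  | none => players

-- the 'for word in words' loop of A, followed by the final flush
def pvLoopA (positions_order : List String) :
    List String → PySem.Dict String String → Option String → List String →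
    PySem.Dict String String
  | [], players, pos, player_name => pvFlushA players pos player_name
  | word :: words, players, pos, player_name =>
    if positions_order.contains word then
      pvLoopA positions_order words (pvFlushA players pos player_name) (some word) []
    else
      pvLoopA positions_order words players pos (player_name ++ [word])

-- 'for position in positions_order: if position not in players: …'  (shared verbatim)
def pvFillMissing (positions_order : List String) (players : PySem.Dict String String) :
    PySem.Dict String String :=
  positions_order.foldl
    (fun players position =>
      if players.contains position = false then players.insert position "LOCKED" else players)
    players

def extract_players (lineup_string : String) (positions_order : List String) :
    List (String × String) :=
  let words := PySem.Str.split₀ lineup_string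
  let players := pvLoopA positions_order words PySem.Dict.empty none []
  (pvFillMissing positions_order players).items

-- ===== PORT B =====
-- the 'while rest:' chunk loop of B; next((i for i,w in enumerate(l) if w in posset), len(l))
-- is the first index of l whose word is in posset, or len(l) = List.findIdx (exact);
-- rest[:k] / rest[k:] with 0 ≤ k ≤ len(rest) are exactly take / drop
def pvLoopB (posset : PySem.Set String) :
    List String → PySem.Dict String String → PySem.Dict String String
  | [], players => players
  | pos :: rest, players =>
    let k := rest.findIdx (fun w => PySem.Set.contains posset w)
    let name := rest.take k
    pvLoopB posset (rest.drop k) (players.insert pos (pvJoinOr name))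
termination_by l _ => l.length
decreasing_by
  simp only [List.length_drop, List.length_cons]
  omega

def extract_players_alt (lineup_string : String) (positions_order : List String) :
    List (String × String) :=
  let posset := PySem.Set.ofList positions_order
  let words := PySem.Str.split₀ lineup_string
  -- rest = words[next((i for i,w in enumerate(words) if w in posset), len(words)):]
  let rest := words.drop (words.findIdx (fun w => PySem.Set.contains posset w))
  let players := pvLoopB posset rest PySem.Dict.empty
  (pvFillMissing positions_order players).items

-- ===== PRECONDITION & SPEC =====
def Spec_extract_players (lineup_string : String) (positions_order : List String) (out : List (String × String)) : Prop := out = extract_players_alt lineup_string positions_order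
instance (lineup_string : String) (positions_order : List String) (out : List (String × String)) : Decidable (Spec_extract_players lineup_string positions_order out) := by unfold Spec_extract_players; infer_instance

-- ===== CLAIM (what is proved, stated in full; the proofs are below) =====
def Claim_equal_extract_players : Prop := ∀ (lineup_string : String) (positions_order : List String), Dom_extract_players lineup_string positions_order → Spec_extract_players lineup_string positions_order (extract_players lineup_string positions_order)

-- ===== LEMMAS AND PROOFS =====

-- the common shape both loops reduce to: the list of (marker, following non-marker run) chunks
def pvChunks (mark : String → Bool) : List String → List (String × List String)
  | [] => []
  | w :: ws =>
    if mark w then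
      (w, ws.takeWhile (fun x => !mark x)) :: pvChunks mark (ws.dropWhile (fun x => !mark x))
    else pvChunks mark ws
termination_by l => l.length
decreasing_by
  · have := List.length_dropWhile_le (fun x => !mark x) ws
    simp only [List.length_cons]; omega
  · simp

def pvStep (players : PySem.Dict String String) (c : String × List String) :
    PySem.Dict String String :=
  players.insert c.1 (pvJoinOr c.2)

theorem pvContains_fun (P : List String) : P.contains = fun w => decide (w ∈ P) := by
  funext w; simp

theorem pvChunks_nil (mark : String → Bool) : pvChunks mark [] = [] := by simp [pvChunks]

theorem pvChunks_cons_pos (mark : String → Bool) (w : String) (ws : List String)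
    (h : mark w = true) :
    pvChunks mark (w :: ws) =
      (w, ws.takeWhile (fun x => !mark x)) :: pvChunks mark (ws.dropWhile (fun x => !mark x)) := by
  rw [pvChunks]; simp [h]

theorem pvChunks_cons_neg (mark : String → Bool) (w : String) (ws : List String)
    (h : mark w = false) : pvChunks mark (w :: ws) = pvChunks mark ws := by
  rw [pvChunks]; simp [h]

theorem pvChunks_dropWhile (mark : String → Bool) (ws : List String) :
    pvChunks mark (ws.dropWhile (fun x => !mark x)) = pvChunks mark ws := by
  induction ws with
  | nil => rfl
  | cons w ws ih =>
    by_cases h : mark w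
    · simp [h]
    · rw [List.dropWhile_cons]
      rw [pvChunks_cons_neg mark w ws (by simp [h])]
      simpa [h] using ih

theorem pvTakeWhile_eq_take_findIdx (p : String → Bool) (l : List String) :
    l.takeWhile (fun x => !p x) = l.take (l.findIdx p) := by
  induction l with
  | nil => rfl
  | cons x l ih =>
    by_cases h : p x
    · simp [List.findIdx_cons, h]
    · simp [List.findIdx_cons, h, ih]

theorem pvDropWhile_eq_drop_findIdx (p : String → Bool) (l : List String) :
    l.dropWhile (fun x => !p x) = l.drop (l.findIdx p) := by
  induction l with
  | nil => rfl
  | cons x l ih =>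
    by_cases h : p x
    · simp [List.findIdx_cons, h]
    · simp [List.findIdx_cons, h, ih]

theorem pvHead_dropWhile (p : String → Bool) (l : List String) (w : String)
    (h : (l.dropWhile (fun x => !p x)).head? = some w) : p w = true := by
  induction l with
  | nil => simp at h
  | cons x l ih =>
    by_cases hx : p x
    · simp [hx] at h; simpa [← h] using hx
    · simp only [List.dropWhile_cons, hx] at h
      exact ih (by simpa using h)

-- A's loop, running with an open position, equals the chunk fold
theorem pvLoopA_some (P : List String) (ws : List String) :
    ∀ (d : PySem.Dict String String) (p : String) (name : List String),
      p ≠ "" → (∀ w ∈ ws, w ≠ "") →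
      pvLoopA P ws d (some p) name =
        (pvChunks (fun w => P.contains w) ws).foldl pvStep
          (d.insert p (pvJoinOr (name ++ ws.takeWhile (fun x => !P.contains x)))) := by
  induction ws with
  | nil =>
    intro d p name hp _
    simp [pvLoopA, pvFlushA, hp, pvChunks_nil]
  | cons w ws ih =>
    intro d p name hp hws
    by_cases h : P.contains w
    · have hw : w ≠ "" := hws w (by simp)
      have hm : w ∈ P := by simpa using h
      rw [pvLoopA, if_pos h]
      rw [ih _ w [] hw (fun x hx => hws x (by simp [hx]))]
      simp only [pvFlushA, if_pos hp]
      rw [pvChunks_cons_pos _ _ _ h, List.foldl_cons]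
      rw [pvChunks_dropWhile]
      simp [pvStep, pvContains_fun, hm]
    · have h' : P.contains w = false := by simp_all
      rw [pvLoopA, if_neg h]
      rw [ih _ p (name ++ [w]) hp (fun x hx => hws x (by simp [hx]))]
      rw [pvChunks_cons_neg _ _ _ h']
      simp only [List.takeWhile_cons, h', Bool.not_false, if_true, List.append_assoc,
        List.singleton_append]

-- A's loop from the initial state equals the chunk fold
theorem pvLoopA_none (P : List String) (ws : List String) :
    ∀ (d : PySem.Dict String String) (name : List String),
      (∀ w ∈ ws, w ≠ "") →
      pvLoopA P ws d none name = (pvChunks (fun w => P.contains w) ws).foldl pvStep d := by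
  induction ws with
  | nil => intro d name _; simp [pvLoopA, pvFlushA, pvChunks_nil]
  | cons w ws ih =>
    intro d name hws
    by_cases h : P.contains w
    · have hw : w ≠ "" := hws w (by simp)
      have hm : w ∈ P := by simpa using h
      rw [pvLoopA, if_pos h]
      rw [pvLoopA_some P ws _ w [] hw (fun x hx => hws x (by simp [hx]))]
      rw [pvChunks_cons_pos _ _ _ h, List.foldl_cons]
      rw [pvChunks_dropWhile]
      simp [pvStep, pvFlushA, pvContains_fun]
    · have h' : P.contains w = false := by simp_all
      rw [pvLoopA, if_neg h]
      rw [ih _ _ (fun x hx => hws x (by simp [hx]))]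
      rw [pvChunks_cons_neg _ _ _ h']

-- membership in set(positions_order) is membership in positions_order
theorem pvSetContains_eq (P : List String) :
    (fun w => PySem.Set.contains (PySem.Set.ofList P) w) = (fun w => P.contains w) := by
  funext w; simp [PySem.Set.mem_ofList]

-- B's chunk loop equals the chunk fold, provided the list starts at a marker
theorem pvLoopB_eq (P : List String) :
    ∀ (n : Nat) (ws : List String) (d : PySem.Dict String String), ws.length ≤ n →
      (∀ w, ws.head? = some w → P.contains w = true) →
      pvLoopB (PySem.Set.ofList P) ws d = (pvChunks (fun w => P.contains w) ws).foldl pvStep d := by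
  intro n
  induction n with
  | zero =>
    intro ws d hlen _
    have hnil : ws = [] := List.eq_nil_of_length_eq_zero (Nat.le_zero.mp hlen)
    subst hnil
    simp [pvLoopB, pvChunks_nil]
  | succ n ih =>
    intro ws d hlen hhead
    match ws with
    | [] => simp [pvLoopB, pvChunks_nil]
    | pos :: rest =>
      have hpos : P.contains pos = true := hhead pos rfl
      rw [pvLoopB]
      simp only [pvSetContains_eq P]
      rw [← pvTakeWhile_eq_take_findIdx, ← pvDropWhile_eq_drop_findIdx]
      rw [pvChunks_cons_pos _ _ _ hpos, List.foldl_cons]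
      have hlen' : (rest.dropWhile (fun x => !P.contains x)).length ≤ n := by
        have := List.length_dropWhile_le (fun x => !P.contains x) rest
        simp only [List.length_cons] at hlen; omega
      rw [ih _ _ hlen' (fun w hw => pvHead_dropWhile _ _ _ hw)]
      simp [pvStep, pvContains_fun]

-- words produced by str.split() are never empty
theorem pvSplitGo_ne_nil (s : List Char) :
    ∀ (cur : List Char) (acc : List (List Char)), (∀ w ∈ acc, w ≠ []) →
      ∀ w ∈ PySem.Chars.split₀.go s cur acc, w ≠ [] := by
  induction s with
  | nil =>
    intro cur acc hacc w hw
    rw [PySem.Chars.split₀.go] at hw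
    by_cases hc : cur.isEmpty
    · rw [if_pos hc] at hw
      exact hacc w (List.mem_reverse.mp hw)
    · rw [if_neg hc] at hw
      rcases List.mem_cons.mp (List.mem_reverse.mp hw) with h | h
      · subst h
        simpa [List.isEmpty_iff] using hc
      · exact hacc w h
  | cons c rest ih =>
    intro cur acc hacc w hw
    rw [PySem.Chars.split₀.go] at hw
    by_cases hsp : PySem.Chars.isspace c
    · rw [if_pos hsp] at hw
      by_cases hc : cur.isEmpty
      · rw [if_pos hc] at hw; exact ih [] acc hacc w hw
      · rw [if_neg hc] at hw
        refine ih [] (cur.reverse :: acc) ?_ w hw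
        intro x hx
        rcases List.mem_cons.mp hx with h | h
        · subst h; simpa [List.isEmpty_iff] using hc
        · exact hacc x h
    · rw [if_neg hsp] at hw
      exact ih (c :: cur) acc hacc w hw

theorem pvSplit₀_ne_empty (s : String) : ∀ w ∈ PySem.Str.split₀ s, w ≠ "" := by
  intro w hw
  rw [PySem.Str.split₀] at hw
  rcases List.mem_map.mp hw with ⟨cs, hcs, rfl⟩
  have hne : cs ≠ [] :=
    pvSplitGo_ne_nil s.toList [] [] (by intro x hx; simp at hx) cs hcs
  intro h
  apply hne
  have h2 : (String.ofList cs).toList = ("" : String).toList := by rw [h]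
  simpa using h2

theorem pvMain (lineup_string : String) (positions_order : List String) :
    extract_players lineup_string positions_order =
      extract_players_alt lineup_string positions_order := by
  unfold extract_players extract_players_alt
  simp only [pvSetContains_eq positions_order]
  rw [← pvDropWhile_eq_drop_findIdx]
  rw [pvLoopB_eq positions_order
        ((PySem.Str.split₀ lineup_string).dropWhile (fun x => !positions_order.contains x)).length
        _ _ (Nat.le_refl _) (fun w hw => pvHead_dropWhile _ _ _ hw)]
  rw [pvChunks_dropWhile]
  rw [pvLoopA_none positions_order _ _ _ (pvSplit₀_ne_empty lineup_string)]

-- ===== VERDICT (by name: the statement is the Claim_ definition above) =====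
theorem extract_players_spec : Claim_equal_extract_players := by
  intro ls P _
  unfold Spec_extract_players
  exact pvMain ls P
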